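-- pv_equiv track=rewrite | github.com/Stunkz/ueProjet | main.py | jeu_fini
-- ===== SOURCE A (Python) =====
-- def case_vide(coord, grille):
--     return grille[coord[0]][coord[1]] == 0
--
-- def calcul_distance(coord_depart, coord_arrivee):
--     return (coord_arrivee[0] - coord_depart[0]), (coord_arrivee[1] - coord_depart[1])  # le [0] et [1] servent pour donner les coord en x et y
--
-- def distance_pour_manger_pion(coord_depart, coord_arrivee):
--     distance = calcul_distance(coord_depart, coord_arrivee)
--     x = distance[0]
--     y = distance[1]
--     return ((x==2)and(y==0)) or ((x==0)and(y==2)) or ((x==-2)and(y==0)) or ((x==0)and(y==-2))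
--
-- def distance_pour_deplacement(coord_depart, coord_arrivee):
--     distance = calcul_distance(coord_depart, coord_arrivee)
--     x = distance[0]
--     y = distance[1]
--     return ((x==1)and(y==0)) or ((x==0)and(y==1)) or ((x==-1)and(y==0)) or ((x==0)and(y==-1))
--
-- def pion_mangeable(grille, coord_depart, joueur):
--     for i in range(len(grille)):
--         for j in range(len(grille)):
--             coord_arrivee = (i, j)
--             distance = calcul_distance(coord_depart, coord_arrivee)
--             pion_milieu = (coord_depart[0]+(distance[0]//2),coord_depart[1]+(distance[1]//2))
--             if distance_pour_manger_pion(coord_depart, coord_arrivee) and case_vide(coord_arrivee, grille) and grille[pion_milieu[0]][pion_milieu[1]] != joueur and grille[pion_milieu[0]][pion_milieu[1]] != 0: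
--                 return True
--     return False
--
-- def pion_deplacable(grille, coord_depart):
--     for i in range(len(grille)):
--         for j in range(len(grille)):
--             coord_arrivee = (i, j)
--             calcul_distance(coord_depart, coord_arrivee)
--             if case_vide(coord_arrivee, grille) and distance_pour_deplacement(coord_depart, coord_arrivee):
--                 return True
--     return False
--
-- def jeu_fini(grille, joueur):
--     #un des joueurs est en dessus de 6 pions
--     nb_pion_blanc = 0 #2
--     nb_pion_noir = 0 #1
--     for i in range(len(grille)):
--         for j in range(len(grille)):
--             if grille[i][j] == 1:
--                 nb_pion_noir+=1
--             if grille[i][j] == 2: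
--                 nb_pion_blanc+=1
--
--     #un des deux joueurs ne peut plus effectuer de déplacements avec ces pions
--     pion_noir_deplacable = 0
--     pion_blanc_deplacable = 0
--     for i in range(len(grille)):
--         for j in range(len(grille)):
--             if grille[i][j] == 1 and (pion_mangeable(grille, (i, j), 1) or pion_deplacable(grille, (i,j))):
--                 pion_noir_deplacable += 1
--             if grille[i][j] == 2 and (pion_mangeable(grille, (i, j), 2) or pion_deplacable(grille, (i,j))):
--                 pion_blanc_deplacable += 1
--
--     return (nb_pion_blanc < 2 or nb_pion_noir < 2) or (pion_noir_deplacable == 0 or pion_blanc_deplacable == 0)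
-- ===== SOURCE B (Python) =====
-- def jeu_fini(grille, joueur):
--     # One pass over the n*n window: count pieces and detect mobility by
--     # probing only the fixed-offset neighbor cells of each piece.
--     n = len(grille)
--     offsets = ((1, 0), (-1, 0), (0, 1), (0, -1),
--                (2, 0), (-2, 0), (0, 2), (0, -2))
--     nb_noir = 0
--     nb_blanc = 0
--     mob_noir = False
--     mob_blanc = False
--     for i in range(n):
--         for j in range(n):
--             p = grille[i][j]
--             if p == 1 or p == 2:
--                 mob = any(
--                     0 <= i + dx < n and 0 <= j + dy < n
--                     and grille[i + dx][j + dy] == 0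
--                     and (abs(dx) + abs(dy) == 1
--                          or (grille[i + dx // 2][j + dy // 2] != 0
--                              and grille[i + dx // 2][j + dy // 2] != p))
--                     for dx, dy in offsets)
--                 if p == 1:
--                     nb_noir += 1
--                     mob_noir = mob_noir or mob
--                 else:
--                     nb_blanc += 1
--                     mob_blanc = mob_blanc or mob
--     return nb_blanc < 2 or nb_noir < 2 or not mob_noir or not mob_blanc
-- ===== Notes on version B (the rewrite author's own statement) =====
-- stated objective: faster
-- what changed: B makes a single pass over the n x n board, counting pieces and testing each piece's mobility by probing only its 8 fixed-offset neighbor cells, instead of A's per-piece rescan of the whole grid inside a whole-grid loop.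
import Mathlib
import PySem

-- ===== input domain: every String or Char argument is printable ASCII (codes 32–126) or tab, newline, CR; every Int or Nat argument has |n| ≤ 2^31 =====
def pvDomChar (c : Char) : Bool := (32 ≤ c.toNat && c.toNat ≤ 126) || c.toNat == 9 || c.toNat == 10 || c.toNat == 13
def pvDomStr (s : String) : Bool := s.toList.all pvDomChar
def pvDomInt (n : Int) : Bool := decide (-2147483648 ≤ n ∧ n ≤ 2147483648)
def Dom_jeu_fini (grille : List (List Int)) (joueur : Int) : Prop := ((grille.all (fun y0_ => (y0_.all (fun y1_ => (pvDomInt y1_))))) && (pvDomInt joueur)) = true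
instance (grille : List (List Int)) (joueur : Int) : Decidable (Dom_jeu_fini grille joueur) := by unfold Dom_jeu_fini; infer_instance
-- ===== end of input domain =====

-- B changes: one pass over the n×n window probing only the 8 fixed-offset neighbor
-- cells of each piece (O(n^2)) instead of A's whole-grid scan per piece (O(n^4)).

-- ===== PORT A =====
-- shared total indexing helper: grille[i][j] (Python raises out of range; excluded by Pre_)
def pvGet2 (g : List (List Int)) (i j : Int) : Int :=
  (PySem.List.pyGet? ((PySem.List.pyGet? g i).getD []) j).getD 0

def pvCaseVide (coord : Int × Int) (grille : List (List Int)) : Bool :=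
  pvGet2 grille coord.1 coord.2 == 0

def pvCalculDistance (coord_depart coord_arrivee : Int × Int) : Int × Int :=
  (coord_arrivee.1 - coord_depart.1, coord_arrivee.2 - coord_depart.2)

def pvDistManger (coord_depart coord_arrivee : Int × Int) : Bool :=
  let distance := pvCalculDistance coord_depart coord_arrivee
  let x := distance.1
  let y := distance.2
  ((x == 2) && (y == 0)) || ((x == 0) && (y == 2)) || ((x == -2) && (y == 0)) || ((x == 0) && (y == -2))

def pvDistDeplacement (coord_depart coord_arrivee : Int × Int) : Bool :=
  let distance := pvCalculDistance coord_depart coord_arrivee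
  let x := distance.1
  let y := distance.2
  ((x == 1) && (y == 0)) || ((x == 0) && (y == 1)) || ((x == -1) && (y == 0)) || ((x == 0) && (y == -1))

def pvPionMangeable (grille : List (List Int)) (coord_depart : Int × Int) (joueur : Int) : Bool :=
  (PySem.List.pyRange 0 (grille.length : Int) 1).any (fun i =>
    (PySem.List.pyRange 0 (grille.length : Int) 1).any (fun j =>
      let coord_arrivee := (i, j)
      let distance := pvCalculDistance coord_depart coord_arrivee
      let pion_milieu := (coord_depart.1 + PySem.Int.floordiv distance.1 2,
                          coord_depart.2 + PySem.Int.floordiv distance.2 2)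
      pvDistManger coord_depart coord_arrivee && pvCaseVide coord_arrivee grille &&
        (pvGet2 grille pion_milieu.1 pion_milieu.2 != joueur) &&
        (pvGet2 grille pion_milieu.1 pion_milieu.2 != 0)))

def pvPionDeplacable (grille : List (List Int)) (coord_depart : Int × Int) : Bool :=
  (PySem.List.pyRange 0 (grille.length : Int) 1).any (fun i =>
    (PySem.List.pyRange 0 (grille.length : Int) 1).any (fun j =>
      let coord_arrivee := (i, j)
      pvCaseVide coord_arrivee grille && pvDistDeplacement coord_depart coord_arrivee))

-- loop body of A's counting pass
def pvStepCountA (grille : List (List Int)) (acc : Int × Int) (i j : Int) : Int × Int :=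
  let acc := if pvGet2 grille i j == 1 then (acc.1 + 1, acc.2) else acc
  if pvGet2 grille i j == 2 then (acc.1, acc.2 + 1) else acc

-- loop body of A's movability-count pass
def pvStepMovA (grille : List (List Int)) (acc : Int × Int) (i j : Int) : Int × Int :=
  let acc := if pvGet2 grille i j == 1 &&
                (pvPionMangeable grille (i, j) 1 || pvPionDeplacable grille (i, j)) then
               (acc.1 + 1, acc.2) else acc
  if pvGet2 grille i j == 2 &&
      (pvPionMangeable grille (i, j) 2 || pvPionDeplacable grille (i, j)) then
    (acc.1, acc.2 + 1) else acc

def jeu_fini (grille : List (List Int)) (joueur : Int) : Bool :=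
  let n : Int := grille.length
  let counts :=
    (PySem.List.pyRange 0 n 1).foldl (fun acc i =>
      (PySem.List.pyRange 0 n 1).foldl (fun acc j => pvStepCountA grille acc i j) acc)
      ((0 : Int), (0 : Int))
  let mov :=
    (PySem.List.pyRange 0 n 1).foldl (fun acc i =>
      (PySem.List.pyRange 0 n 1).foldl (fun acc j => pvStepMovA grille acc i j) acc)
      ((0 : Int), (0 : Int))
  (decide (counts.2 < 2) || decide (counts.1 < 2)) || ((mov.1 == 0) || (mov.2 == 0))

-- ===== PORT B =====
def pvAltOffsets : List (Int × Int) :=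
  [(1, 0), (-1, 0), (0, 1), (0, -1), (2, 0), (-2, 0), (0, 2), (0, -2)]

def pvAltMob (grille : List (List Int)) (i j p : Int) : Bool :=
  pvAltOffsets.any (fun o =>
    let dx := o.1
    let dy := o.2
    decide (0 ≤ i + dx) && decide (i + dx < (grille.length : Int)) &&
    decide (0 ≤ j + dy) && decide (j + dy < (grille.length : Int)) &&
    (pvGet2 grille (i + dx) (j + dy) == 0) &&
    ((dx.natAbs + dy.natAbs == 1) ||
      ((pvGet2 grille (i + PySem.Int.floordiv dx 2) (j + PySem.Int.floordiv dy 2) != 0) &&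
       (pvGet2 grille (i + PySem.Int.floordiv dx 2) (j + PySem.Int.floordiv dy 2) != p))))

-- loop body of B's single pass over the square; state = (nb_noir, nb_blanc, mob_noir, mob_blanc)
def pvStepB (grille : List (List Int)) (s : Int × Int × Bool × Bool) (i j : Int) :
    Int × Int × Bool × Bool :=
  let p := pvGet2 grille i j
  if p == 1 || p == 2 then
    let mob := pvAltMob grille i j p
    if p == 1 then (s.1 + 1, s.2.1, s.2.2.1 || mob, s.2.2.2)
    else (s.1, s.2.1 + 1, s.2.2.1, s.2.2.2 || mob)
  else s

def jeu_fini_alt (grille : List (List Int)) (joueur : Int) : Bool :=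
  let n : Int := grille.length
  let s :=
    (PySem.List.pyRange 0 n 1).foldl (fun s i =>
      (PySem.List.pyRange 0 n 1).foldl (fun s j => pvStepB grille s i j) s)
      ((0 : Int), (0 : Int), false, false)
  decide (s.2.1 < 2) || decide (s.1 < 2) || !s.2.2.1 || !s.2.2.2

-- ===== PRECONDITION & SPEC =====
-- Pre_ excludes exactly the ragged grids on which Python A raises IndexError
-- (A reads grille[i][j] for all i, j < len(grille), so every row must have ≥ len(grille) cells).
def Pre_jeu_fini (grille : List (List Int)) (joueur : Int) : Prop :=
  ∀ row ∈ grille, grille.length ≤ row.length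
instance (grille : List (List Int)) (joueur : Int) : Decidable (Pre_jeu_fini grille joueur) := by
  unfold Pre_jeu_fini; infer_instance

def pvWitness_jeu_fini : List (List Int) × Int := ([[1, 0], [0, 2]], 1)

def Spec_jeu_fini (grille : List (List Int)) (joueur : Int) (out : Bool) : Prop := out = jeu_fini_alt grille joueur
instance (grille : List (List Int)) (joueur : Int) (out : Bool) : Decidable (Spec_jeu_fini grille joueur out) := by unfold Spec_jeu_fini; infer_instance

-- ===== CLAIM (what is proved, stated in full; the proofs are below) =====
def Claim_equal_jeu_fini : Prop := ∀ (grille : List (List Int)) (joueur : Int), Dom_jeu_fini grille joueur → Pre_jeu_fini grille joueur → Spec_jeu_fini grille joueur (jeu_fini grille joueur)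

-- ===== LEMMAS AND PROOFS =====

-- nested loop over two ranges = single fold over the list of cells
lemma pvFoldNested {σ : Type} (R S : List Int) (g : σ → Int → Int → σ) (init : σ) :
    R.foldl (fun s i => S.foldl (fun s j => g s i j) s) init
      = (R.flatMap (fun i => S.map (fun j => (i, j)))).foldl (fun s c => g s c.1 c.2) init := by
  induction R generalizing init with
  | nil => rfl
  | cons i R ih => simp [List.foldl_append, List.foldl_map, ih]

lemma pvCountAFold (g : List (List Int)) (l : List (Int × Int)) (a b : Int) :
    l.foldl (fun s c => pvStepCountA g s c.1 c.2) (a, b)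
      = (a + (l.countP (fun c => pvGet2 g c.1 c.2 == 1) : Int),
         b + (l.countP (fun c => pvGet2 g c.1 c.2 == 2) : Int)) := by
  induction l generalizing a b with
  | nil => simp
  | cons c l ih =>
    have hs : pvStepCountA g (a, b) c.1 c.2
        = (a + (if pvGet2 g c.1 c.2 == 1 then 1 else 0),
           b + (if pvGet2 g c.1 c.2 == 2 then 1 else 0)) := by
      unfold pvStepCountA; split_ifs <;> simp
    rw [List.foldl_cons, hs, ih, List.countP_cons, List.countP_cons]
    simp only [Prod.ext_iff]
    constructor <;> split_ifs <;> push_cast <;> ring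

lemma pvMovAFold (g : List (List Int)) (l : List (Int × Int)) (a b : Int) :
    l.foldl (fun s c => pvStepMovA g s c.1 c.2) (a, b)
      = (a + (l.countP (fun c => pvGet2 g c.1 c.2 == 1 &&
              (pvPionMangeable g (c.1, c.2) 1 || pvPionDeplacable g (c.1, c.2))) : Int),
         b + (l.countP (fun c => pvGet2 g c.1 c.2 == 2 &&
              (pvPionMangeable g (c.1, c.2) 2 || pvPionDeplacable g (c.1, c.2))) : Int)) := by
  induction l generalizing a b with
  | nil => simp
  | cons c l ih =>
    have hs : pvStepMovA g (a, b) c.1 c.2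
        = (a + (if pvGet2 g c.1 c.2 == 1 &&
                  (pvPionMangeable g (c.1, c.2) 1 || pvPionDeplacable g (c.1, c.2)) then 1 else 0),
           b + (if pvGet2 g c.1 c.2 == 2 &&
                  (pvPionMangeable g (c.1, c.2) 2 || pvPionDeplacable g (c.1, c.2)) then 1 else 0)) := by
      unfold pvStepMovA; split_ifs <;> simp_all
    rw [List.foldl_cons, hs, ih, List.countP_cons, List.countP_cons]
    simp only [Prod.ext_iff]
    constructor <;> split_ifs <;> push_cast <;> ring

lemma pvBFold (g : List (List Int)) (l : List (Int × Int)) (a b : Int) (u v : Bool) :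
    l.foldl (fun s c => pvStepB g s c.1 c.2) (a, b, u, v)
      = (a + (l.countP (fun c => pvGet2 g c.1 c.2 == 1) : Int),
         b + (l.countP (fun c => pvGet2 g c.1 c.2 == 2) : Int),
         u || l.any (fun c => pvGet2 g c.1 c.2 == 1 && pvAltMob g c.1 c.2 1),
         v || l.any (fun c => pvGet2 g c.1 c.2 == 2 && pvAltMob g c.1 c.2 2)) := by
  induction l generalizing a b u v with
  | nil => simp
  | cons c l ih =>
    have hs : pvStepB g (a, b, u, v) c.1 c.2
        = (a + (if pvGet2 g c.1 c.2 == 1 then 1 else 0),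
           b + (if pvGet2 g c.1 c.2 == 2 then 1 else 0),
           u || (pvGet2 g c.1 c.2 == 1 && pvAltMob g c.1 c.2 1),
           v || (pvGet2 g c.1 c.2 == 2 && pvAltMob g c.1 c.2 2)) := by
      unfold pvStepB; split_ifs <;> simp_all
    rw [List.foldl_cons, hs, ih, List.countP_cons, List.countP_cons]
    simp only [List.any_cons, Prod.ext_iff]
    refine ⟨?_, ?_, ?_, ?_⟩
    · split_ifs <;> push_cast <;> ring
    · split_ifs <;> push_cast <;> ring
    · simp [Bool.or_assoc]
    · simp [Bool.or_assoc]

lemma pvCellEq (g : List (List Int)) (i j p : Int)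
    (hi0 : 0 ≤ i) (hin : i < (g.length : Int)) (hj0 : 0 ≤ j) (hjn : j < (g.length : Int)) :
    (pvPionMangeable g (i, j) p || pvPionDeplacable g (i, j)) = pvAltMob g i j p := by
  have e1 : PySem.Int.floordiv (2:Int) 2 = 1 := by decide
  have e2 : PySem.Int.floordiv (-2:Int) 2 = -1 := by decide
  have e3 : PySem.Int.floordiv (0:Int) 2 = 0 := by decide
  rw [Bool.eq_iff_iff]
  simp only [pvPionMangeable, pvPionDeplacable, pvAltMob, pvAltOffsets, pvDistManger,
    pvDistDeplacement, pvCalculDistance, pvCaseVide, List.any_cons, List.any_nil,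
    List.any_eq_true, PySem.List.mem_pyRange_one, Bool.or_eq_true, Bool.and_eq_true,
    beq_iff_eq, bne_iff_ne, decide_eq_true_eq, e1, e2, e3]
  norm_num
  constructor
  · rintro (⟨a, ⟨ha0, han⟩, b, ⟨hb0, hbn⟩, ⟨⟨hd, hv⟩, hm1⟩, hm2⟩ | ⟨a, ⟨ha0, han⟩, b, ⟨hb0, hbn⟩, hv, hd⟩)
    · rcases hd with ((⟨h1, h2⟩ | ⟨h1, h2⟩) | ⟨h1, h2⟩) | ⟨h1, h2⟩
      · rw [show a = i + 2 from by omega, show b = j from by omega] at hv hm1 hm2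
        rw [show i + (i + 2 - i) / 2 = i + 1 from by omega, show j + (j - j) / 2 = j from by omega] at hm1 hm2
        exact Or.inr (Or.inr (Or.inr (Or.inr (Or.inl ⟨⟨⟨⟨⟨by omega, by omega⟩, by omega⟩, by omega⟩, hv⟩, hm2, hm1⟩))))
      · rw [show a = i from by omega, show b = j + 2 from by omega] at hv hm1 hm2
        rw [show i + (i - i) / 2 = i from by omega, show j + (j + 2 - j) / 2 = j + 1 from by omega] at hm1 hm2
        exact Or.inr (Or.inr (Or.inr (Or.inr (Or.inr (Or.inr (Or.inl ⟨⟨⟨⟨⟨by omega, by omega⟩, by omega⟩, by omega⟩, hv⟩, hm2, hm1⟩))))))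
      · rw [show a = i + -2 from by omega, show b = j from by omega] at hv hm1 hm2
        rw [show i + (i + -2 - i) / 2 = i + -1 from by omega, show j + (j - j) / 2 = j from by omega] at hm1 hm2
        exact Or.inr (Or.inr (Or.inr (Or.inr (Or.inr (Or.inl ⟨⟨⟨⟨⟨by omega, by omega⟩, by omega⟩, by omega⟩, hv⟩, hm2, hm1⟩)))))
      · rw [show a = i from by omega, show b = j + -2 from by omega] at hv hm1 hm2
        rw [show i + (i - i) / 2 = i from by omega, show j + (j + -2 - j) / 2 = j + -1 from by omega] at hm1 hm2
        exact Or.inr (Or.inr (Or.inr (Or.inr (Or.inr (Or.inr (Or.inr (⟨⟨⟨⟨⟨by omega, by omega⟩, by omega⟩, by omega⟩, hv⟩, hm2, hm1⟩)))))))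
    · rcases hd with ((⟨h1, h2⟩ | ⟨h1, h2⟩) | ⟨h1, h2⟩) | ⟨h1, h2⟩
      · rw [show a = i + 1 from by omega, show b = j from by omega] at hv
        exact Or.inl ⟨⟨⟨⟨by omega, by omega⟩, by omega⟩, by omega⟩, hv⟩
      · rw [show a = i from by omega, show b = j + 1 from by omega] at hv
        exact Or.inr (Or.inr (Or.inl ⟨⟨⟨⟨by omega, by omega⟩, by omega⟩, by omega⟩, hv⟩))
      · rw [show a = i + -1 from by omega, show b = j from by omega] at hv
        exact Or.inr (Or.inl ⟨⟨⟨⟨by omega, by omega⟩, by omega⟩, by omega⟩, hv⟩)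
      · rw [show a = i from by omega, show b = j + -1 from by omega] at hv
        exact Or.inr (Or.inr (Or.inr (Or.inl ⟨⟨⟨⟨by omega, by omega⟩, by omega⟩, by omega⟩, hv⟩)))
  · rintro (⟨⟨⟨⟨h1, h2⟩, h3⟩, h4⟩, h5⟩ | ⟨⟨⟨⟨h1, h2⟩, h3⟩, h4⟩, h5⟩ | ⟨⟨⟨⟨h1, h2⟩, h3⟩, h4⟩, h5⟩ |
      ⟨⟨⟨⟨h1, h2⟩, h3⟩, h4⟩, h5⟩ | ⟨⟨⟨⟨⟨h1, h2⟩, h3⟩, h4⟩, h5⟩, h6, h7⟩ |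
      ⟨⟨⟨⟨⟨h1, h2⟩, h3⟩, h4⟩, h5⟩, h6, h7⟩ | ⟨⟨⟨⟨⟨h1, h2⟩, h3⟩, h4⟩, h5⟩, h6, h7⟩ |
      ⟨⟨⟨⟨⟨h1, h2⟩, h3⟩, h4⟩, h5⟩, h6, h7⟩)
    · exact Or.inr ⟨i + 1, ⟨by omega, by omega⟩, j, ⟨by omega, by omega⟩, h5, by norm_num⟩
    · exact Or.inr ⟨i + -1, ⟨by omega, by omega⟩, j, ⟨by omega, by omega⟩, h5, by norm_num⟩
    · exact Or.inr ⟨i, ⟨by omega, by omega⟩, j + 1, ⟨by omega, by omega⟩, h5, by norm_num⟩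
    · exact Or.inr ⟨i, ⟨by omega, by omega⟩, j + -1, ⟨by omega, by omega⟩, h5, by norm_num⟩
    · refine Or.inl ⟨i + 2, ⟨by omega, by omega⟩, j, ⟨by omega, by omega⟩, ⟨⟨by norm_num, h5⟩, ?_⟩, ?_⟩
      · have ea : i + (i + 2 - i) / 2 = i + 1 := by omega
        have eb : j + (j - j) / 2 = j := by omega
        rw [ea, eb]; exact h7
      · have ea : i + (i + 2 - i) / 2 = i + 1 := by omega
        have eb : j + (j - j) / 2 = j := by omega
        rw [ea, eb]; exact h6
    · refine Or.inl ⟨i + -2, ⟨by omega, by omega⟩, j, ⟨by omega, by omega⟩, ⟨⟨by norm_num, h5⟩, ?_⟩, ?_⟩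
      · have ea : i + (i + -2 - i) / 2 = i + -1 := by omega
        have eb : j + (j - j) / 2 = j := by omega
        rw [ea, eb]; exact h7
      · have ea : i + (i + -2 - i) / 2 = i + -1 := by omega
        have eb : j + (j - j) / 2 = j := by omega
        rw [ea, eb]; exact h6
    · refine Or.inl ⟨i, ⟨by omega, by omega⟩, j + 2, ⟨by omega, by omega⟩, ⟨⟨by norm_num, h5⟩, ?_⟩, ?_⟩
      · have ea : i + (i - i) / 2 = i := by omega
        have eb : j + (j + 2 - j) / 2 = j + 1 := by omega
        rw [ea, eb]; exact h7
      · have ea : i + (i - i) / 2 = i := by omega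
        have eb : j + (j + 2 - j) / 2 = j + 1 := by omega
        rw [ea, eb]; exact h6
    · refine Or.inl ⟨i, ⟨by omega, by omega⟩, j + -2, ⟨by omega, by omega⟩, ⟨⟨by norm_num, h5⟩, ?_⟩, ?_⟩
      · have ea : i + (i - i) / 2 = i := by omega
        have eb : j + (j + -2 - j) / 2 = j + -1 := by omega
        rw [ea, eb]; exact h7
      · have ea : i + (i - i) / 2 = i := by omega
        have eb : j + (j + -2 - j) / 2 = j + -1 := by omega
        rw [ea, eb]; exact h6

-- the cells of the n×n window, and what membership in it means
lemma pvMemCells (n : Int) (c : Int × Int)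
    (hc : c ∈ (PySem.List.pyRange 0 n 1).flatMap
        (fun i => (PySem.List.pyRange 0 n 1).map (fun j => (i, j)))) :
    0 ≤ c.1 ∧ c.1 < n ∧ 0 ≤ c.2 ∧ c.2 < n := by
  simp only [List.mem_flatMap, List.mem_map, PySem.List.mem_pyRange_one] at hc
  obtain ⟨i, hi, j, hj, rfl⟩ := hc
  exact ⟨hi.1, hi.2, hj.1, hj.2⟩

-- an accumulated count is zero exactly when no element satisfies the predicate
lemma pvCountZeroAny {α : Type} (l : List α) (q : α → Bool) :
    ((0 + (l.countP q : Int)) == 0) = !(l.any q) := by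
  rw [Bool.eq_iff_iff]
  simp [List.countP_eq_zero]

-- ===== VERDICT (by name: the statement is the Claim_ definition above) =====
theorem jeu_fini_spec : Claim_equal_jeu_fini := by
  intro grille joueur _hdom _hpre
  unfold Spec_jeu_fini
  simp only [jeu_fini, jeu_fini_alt]
  rw [pvFoldNested, pvFoldNested, pvFoldNested, pvCountAFold, pvMovAFold, pvBFold]
  have hc1 : ∀ c ∈ (PySem.List.pyRange 0 (grille.length : Int) 1).flatMap
      (fun i => (PySem.List.pyRange 0 (grille.length : Int) 1).map (fun j => (i, j))),
      (pvGet2 grille c.1 c.2 == 1 &&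
        (pvPionMangeable grille (c.1, c.2) 1 || pvPionDeplacable grille (c.1, c.2)))
        = (pvGet2 grille c.1 c.2 == 1 && pvAltMob grille c.1 c.2 1) := by
    intro c hc
    obtain ⟨h1, h2, h3, h4⟩ := pvMemCells _ c hc
    rw [pvCellEq grille c.1 c.2 1 h1 h2 h3 h4]
  have hc2 : ∀ c ∈ (PySem.List.pyRange 0 (grille.length : Int) 1).flatMap
      (fun i => (PySem.List.pyRange 0 (grille.length : Int) 1).map (fun j => (i, j))),
      (pvGet2 grille c.1 c.2 == 2 &&
        (pvPionMangeable grille (c.1, c.2) 2 || pvPionDeplacable grille (c.1, c.2)))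
        = (pvGet2 grille c.1 c.2 == 2 && pvAltMob grille c.1 c.2 2) := by
    intro c hc
    obtain ⟨h1, h2, h3, h4⟩ := pvMemCells _ c hc
    rw [pvCellEq grille c.1 c.2 2 h1 h2 h3 h4]
  have hc1' : ∀ c ∈ (PySem.List.pyRange 0 (grille.length : Int) 1).flatMap
      (fun i => (PySem.List.pyRange 0 (grille.length : Int) 1).map (fun j => (i, j))),
      ((pvGet2 grille c.1 c.2 == 1 &&
        (pvPionMangeable grille (c.1, c.2) 1 || pvPionDeplacable grille (c.1, c.2))) = true ↔
       (pvGet2 grille c.1 c.2 == 1 && pvAltMob grille c.1 c.2 1) = true) :=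
    fun c hc => by rw [hc1 c hc]
  have hc2' : ∀ c ∈ (PySem.List.pyRange 0 (grille.length : Int) 1).flatMap
      (fun i => (PySem.List.pyRange 0 (grille.length : Int) 1).map (fun j => (i, j))),
      ((pvGet2 grille c.1 c.2 == 2 &&
        (pvPionMangeable grille (c.1, c.2) 2 || pvPionDeplacable grille (c.1, c.2))) = true ↔
       (pvGet2 grille c.1 c.2 == 2 && pvAltMob grille c.1 c.2 2) = true) :=
    fun c hc => by rw [hc2 c hc]
  rw [List.countP_congr hc1', List.countP_congr hc2', pvCountZeroAny, pvCountZeroAny]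
  simp [Bool.or_assoc]
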